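-- pv_equiv track=rewrite | github.com/arpanauts/biomapper | biomapper/core/strategy_actions/generate_detailed_report.py | _group_by_ontology
-- ===== SOURCE A (Python) =====
-- from typing import Dict, Any, List, Optional, Set
-- from collections import defaultdict, Counter
--
-- def _group_by_ontology(step_results: List[Dict]) -> Dict[str, List[Dict]]:
--     """Group results by ontology type transitions."""
--     grouped = defaultdict(list)
--     for step in step_results:
--         input_onto = step.get('input_ontology_type', 'unknown')
--         output_onto = step.get('output_ontology_type', input_onto)
--         key = f"{input_onto} → {output_onto}"
--         grouped[key].append(step)
--     return dict(grouped)
-- ===== SOURCE B (Python) =====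
-- def _group_by_ontology(step_results):
--     """Group results by ontology type transitions."""
--     def key(step):
--         input_onto = step.get('input_ontology_type', 'unknown')
--         return f"{input_onto} → {step.get('output_ontology_type', input_onto)}"
--     keys = [key(s) for s in step_results]
--     return {k: [s for s, ks in zip(step_results, keys) if ks == k]
--             for k in dict.fromkeys(keys)}
-- ===== Notes on version B (the rewrite author's own statement) =====
-- stated objective: alternative
-- what changed: Replaces the single-pass defaultdict-append loop by a two-phase decomposition: compute the key of every step once, then build the result as a dict comprehension over the distinct keys (dict.fromkeys) with a per-key filter over the zipped (step, key) pairs.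
import Mathlib
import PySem

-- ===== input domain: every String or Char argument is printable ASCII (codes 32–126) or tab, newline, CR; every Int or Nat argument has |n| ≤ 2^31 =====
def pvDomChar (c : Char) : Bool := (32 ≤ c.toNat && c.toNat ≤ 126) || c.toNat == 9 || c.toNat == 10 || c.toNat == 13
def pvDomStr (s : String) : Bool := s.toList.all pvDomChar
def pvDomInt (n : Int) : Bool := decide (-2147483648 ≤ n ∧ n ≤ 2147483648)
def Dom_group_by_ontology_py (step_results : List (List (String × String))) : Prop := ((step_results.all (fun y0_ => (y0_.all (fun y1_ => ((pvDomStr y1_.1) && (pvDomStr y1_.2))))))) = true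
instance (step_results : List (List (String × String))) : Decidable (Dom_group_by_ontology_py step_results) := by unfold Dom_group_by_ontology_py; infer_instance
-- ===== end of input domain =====

-- B replaces A's single-pass defaultdict-append loop by computing each step's key once
-- and building the groups as a comprehension over the distinct keys (alternative decomposition, not faster).


-- the transition key f"{input_onto} → {output_onto}" with Python's .get defaults (shared by both ports)
def pvKey (step : List (String × String)) : String :=
  let input_onto := (PySem.Dict.mk step).getD "input_ontology_type" "unknown"
  let output_onto := (PySem.Dict.mk step).getD "output_ontology_type" input_onto
  input_onto ++ " → " ++ output_onto

-- ===== PORT A =====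
-- for step in step_results: grouped[key].append(step); return dict(grouped)
def group_by_ontology_py (step_results : List (List (String × String))) : List (String × List (List (String × String))) :=
  (step_results.foldl
    (fun grouped step => grouped.modify (pvKey step) [] (fun l => l ++ [step]))
    PySem.Dict.empty).items

-- ===== PORT B =====
-- keys computed once; dict comprehension over the distinct keys with a per-key filter of zip(step_results, keys)
def group_by_ontology_py_alt (step_results : List (List (String × String))) : List (String × List (List (String × String))) :=
  let keys := step_results.map pvKey
  (PySem.List.dedup keys).map
    (fun k => (k, ((step_results.zip keys).filter (fun p => p.2 == k)).map (fun p => p.1)))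

-- ===== PRECONDITION & SPEC =====
def Spec_group_by_ontology_py (step_results : List (List (String × String))) (out : List (String × List (List (String × String)))) : Prop := out = group_by_ontology_py_alt step_results
instance (step_results : List (List (String × String))) (out : List (String × List (List (String × String)))) : Decidable (Spec_group_by_ontology_py step_results out) := by unfold Spec_group_by_ontology_py; infer_instance

-- ===== CLAIM (what is proved, stated in full; the proofs are below) =====
def Claim_equal_group_by_ontology_py : Prop := ∀ (step_results : List (List (String × String))), Dom_group_by_ontology_py step_results → Spec_group_by_ontology_py step_results (group_by_ontology_py step_results)

-- ===== LEMMAS AND PROOFS =====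

-- A's grouping fold, keys: insertion order of the distinct keys
theorem pvKeysA (steps : List (List (String × String))) :
    (steps.foldl (fun d s => d.modify (pvKey s) [] (fun l => l ++ [s])) PySem.Dict.empty).keys
      = PySem.List.dedup (steps.map pvKey) := by
  rw [PySem.Dict.keys_foldl_modify_key]
  simp [PySem.Dict.keys_empty, PySem.Set.update_nil_left, PySem.List.dedup_eq_ofList]

theorem pvNodupA (steps : List (List (String × String))) :
    (steps.foldl (fun d s => d.modify (pvKey s) [] (fun l => l ++ [s])) PySem.Dict.empty).keys.Nodup := by
  rw [pvKeysA]; exact PySem.List.nodup_dedup _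

-- A's grouping fold, value at a key: the steps with that key, in order
theorem pvGetDA (steps : List (List (String × String))) (k : String) :
    (steps.foldl (fun d s => d.modify (pvKey s) [] (fun l => l ++ [s])) PySem.Dict.empty).getD k []
      = (steps.filter (fun s => pvKey s == k)) := by
  have h : steps.foldl (fun d s => d.modify (pvKey s) [] (fun l => l ++ [s])) PySem.Dict.empty
      = (steps.map (fun s => (pvKey s, s))).foldl (fun d p => d.modify p.1 [] (fun l => l ++ [p.2])) PySem.Dict.empty := by
    rw [List.foldl_map]
  rw [h, PySem.Dict.getD_foldl_modify_append]
  simp [List.filter_map, List.map_map, Function.comp_def]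

theorem group_by_ontology_py_eq_alt (steps : List (List (String × String))) :
    group_by_ontology_py steps = group_by_ontology_py_alt steps := by
  unfold group_by_ontology_py group_by_ontology_py_alt
  rw [PySem.Dict.items_eq_map_keys _ (pvNodupA steps) ([] : List (List (String × String))), pvKeysA]
  refine List.map_congr_left (fun k _ => ?_)
  rw [pvGetDA]
  have hz : steps.zip (steps.map pvKey) = steps.map (fun s => (s, pvKey s)) := by
    simpa using (List.zip_map' (f := fun s => s) (g := pvKey) (l := steps))
  simp [hz, List.filter_map, List.map_map, Function.comp_def]

-- ===== VERDICT (by name: the statement is the Claim_ definition above) =====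
theorem group_by_ontology_py_spec : Claim_equal_group_by_ontology_py := by
  intro steps _
  unfold Spec_group_by_ontology_py
  exact group_by_ontology_py_eq_alt steps
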